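-- pv_equiv track=rewrite | github.com/FelineAlloy/2026-NVIDIA-iQuHack | tutorial_notebook/auxiliary_files/labs_utils.py | compute_topology_overlaps
-- ===== SOURCE A (Python) =====
-- def compute_topology_overlaps(G2, G4):
--     def count_matches(list_a, list_b):
--         matches = 0
--         set_b = set(tuple(sorted(x)) for x in list_b)
--         for item in list_a:
--             if tuple(sorted(item)) in set_b: matches += 1
--         return matches
--     return {'22': count_matches(G2, G2), '44': count_matches(G4, G4), '24': 0}
-- ===== SOURCE B (Python) =====
-- def compute_topology_overlaps(G2, G4):
--     # Each topology is only compared with itself, so every item's sorted tuple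
--     # is necessarily in the set built from the same list: the counts are just
--     # the list lengths.
--     return {'22': len(G2), '44': len(G4), '24': 0}
-- ===== Notes on version B (the rewrite author's own statement) =====
-- stated objective: simpler
-- what changed: A builds a set of sorted tuples and scans the list counting membership for each self-comparison; B observes both calls compare a list with itself so every element matches, and returns the closed form {'22': len(G2), '44': len(G4), '24': 0} with no set or loop.
import Mathlib
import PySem

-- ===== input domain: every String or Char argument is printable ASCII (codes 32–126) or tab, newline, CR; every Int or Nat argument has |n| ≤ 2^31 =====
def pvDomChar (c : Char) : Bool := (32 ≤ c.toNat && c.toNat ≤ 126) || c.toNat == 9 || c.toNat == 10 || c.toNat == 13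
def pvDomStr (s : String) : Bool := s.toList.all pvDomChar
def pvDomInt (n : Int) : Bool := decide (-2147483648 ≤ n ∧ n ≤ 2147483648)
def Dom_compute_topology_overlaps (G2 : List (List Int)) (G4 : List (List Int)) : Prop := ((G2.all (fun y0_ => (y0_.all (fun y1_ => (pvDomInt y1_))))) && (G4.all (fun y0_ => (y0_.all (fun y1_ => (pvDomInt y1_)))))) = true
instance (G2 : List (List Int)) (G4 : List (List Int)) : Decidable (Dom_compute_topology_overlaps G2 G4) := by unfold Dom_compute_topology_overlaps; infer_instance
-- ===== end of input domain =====

-- ===== PORT A =====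
-- B replaces A's set-and-scan self-comparison with the closed form from list lengths (simpler).
-- inner helper count_matches: builds set of sorted tuples of list_b, counts members of list_a in it
def pvCountMatches (list_a list_b : List (List Int)) : Int :=
  let set_b : PySem.Set (List Int) :=
    PySem.Set.ofList (list_b.map (fun x => PySem.List.sorted x (fun y => y) false))
  list_a.foldl (fun m item =>
    if PySem.Set.contains set_b (PySem.List.sorted item (fun y => y) false) then m + 1
    else m) 0

def compute_topology_overlaps (G2 : List (List Int)) (G4 : List (List Int)) : List (String × Int) :=
  [("22", pvCountMatches G2 G2), ("44", pvCountMatches G4 G4), ("24", 0)]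

-- ===== PORT B =====
def compute_topology_overlaps_alt (G2 : List (List Int)) (G4 : List (List Int)) : List (String × Int) :=
  [("22", (G2.length : Int)), ("44", (G4.length : Int)), ("24", 0)]

-- ===== PRECONDITION & SPEC =====
def Spec_compute_topology_overlaps (G2 : List (List Int)) (G4 : List (List Int)) (out : List (String × Int)) : Prop := out = compute_topology_overlaps_alt G2 G4
instance (G2 : List (List Int)) (G4 : List (List Int)) (out : List (String × Int)) : Decidable (Spec_compute_topology_overlaps G2 G4 out) := by unfold Spec_compute_topology_overlaps; infer_instance

-- ===== CLAIM (what is proved, stated in full; the proofs are below) =====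
def Claim_equal_compute_topology_overlaps : Prop := ∀ (G2 : List (List Int)) (G4 : List (List Int)), Dom_compute_topology_overlaps G2 G4 → Spec_compute_topology_overlaps G2 G4 (compute_topology_overlaps G2 G4)

-- ===== LEMMAS AND PROOFS =====

-- ===== VERDICT (by name: the statement is the Claim_ definition above) =====
-- counting over list_a adds 1 per element whenever every sorted item is in the set
theorem pvCount_invariant (s : PySem.Set (List Int)) (la : List (List Int)) (acc : Int)
    (h : ∀ item ∈ la, PySem.Set.contains s (PySem.List.sorted item (fun y => y) false) = true) :
    la.foldl (fun m item =>
      if PySem.Set.contains s (PySem.List.sorted item (fun y => y) false) then m + 1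
      else m) acc = acc + la.length := by
  induction la generalizing acc with
  | nil => simp
  | cons hd tl ih =>
    simp only [List.foldl_cons, h hd (by simp), if_pos]
    rw [ih (acc + 1) (fun item hm => h item (by simp [hm]))]
    simp
    omega

theorem pvCountMatches_self (G : List (List Int)) : pvCountMatches G G = G.length := by
  unfold pvCountMatches
  rw [pvCount_invariant]
  · simp
  · intro item hm
    rw [PySem.Set.contains_iff, PySem.Set.mem_ofList]
    exact List.mem_map_of_mem hm

theorem compute_topology_overlaps_spec : Claim_equal_compute_topology_overlaps := by
  intro G2 G4 _
  unfold Spec_compute_topology_overlaps compute_topology_overlaps compute_topology_overlaps_alt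
  rw [pvCountMatches_self, pvCountMatches_self]
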